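-- pv_equiv track=rewrite | github.com/direvus/adventofcode | y2021/d23.py | make_node
-- ===== SOURCE A (Python) =====
-- def make_node(node, letter, source, dest) -> tuple:
--     cols = []
--     x = 1
--     for pods in node:
--         y = 1
--         col = []
--         for pod in pods:
--             p = (x, y)
--             if p == dest:
--                 pod = letter
--             elif p == source:
--                 pod = ''
--
--             col.append(pod)
--             y += 1
--         cols.append(tuple(col))
--         x += 1
--     return tuple(cols)
-- ===== SOURCE B (Python) =====
-- def make_node(node, letter, source, dest) -> tuple:
--     # Flat-buffer approach: flatten the grid into one list, write the two edits
--     # at computed flat offsets (source first, so dest wins on overlap; out-of-range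
--     # coordinates ignored by the bounds check), then reshape by the row lengths.
--     lens = [len(row) for row in node]
--     flat = [pod for row in node for pod in row]
--
--     def put(coord, value):
--         x, y = coord
--         if 1 <= x <= len(lens) and 1 <= y <= lens[x - 1]:
--             flat[sum(lens[:x - 1]) + y - 1] = value
--
--     put(source, '')
--     put(dest, letter)
--
--     rows = []
--     i = 0
--     for n in lens:
--         rows.append(tuple(flat[i:i + n]))
--         i += n
--     return tuple(rows)
-- ===== Notes on version B (the rewrite author's own statement) =====
-- stated objective: alternative
-- what changed: B flattens the grid into a single flat buffer, performs the two edits as bounds-checked writes at computed flat offsets (source write first so the dest write wins when the cells coincide, out-of-range coordinates rejected by the bounds check), and then reshapes the buffer back into rows by the recorded row lengths, instead of A's per-cell (x,y) coordinate comparison over every cell of the grid.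
import Mathlib
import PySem

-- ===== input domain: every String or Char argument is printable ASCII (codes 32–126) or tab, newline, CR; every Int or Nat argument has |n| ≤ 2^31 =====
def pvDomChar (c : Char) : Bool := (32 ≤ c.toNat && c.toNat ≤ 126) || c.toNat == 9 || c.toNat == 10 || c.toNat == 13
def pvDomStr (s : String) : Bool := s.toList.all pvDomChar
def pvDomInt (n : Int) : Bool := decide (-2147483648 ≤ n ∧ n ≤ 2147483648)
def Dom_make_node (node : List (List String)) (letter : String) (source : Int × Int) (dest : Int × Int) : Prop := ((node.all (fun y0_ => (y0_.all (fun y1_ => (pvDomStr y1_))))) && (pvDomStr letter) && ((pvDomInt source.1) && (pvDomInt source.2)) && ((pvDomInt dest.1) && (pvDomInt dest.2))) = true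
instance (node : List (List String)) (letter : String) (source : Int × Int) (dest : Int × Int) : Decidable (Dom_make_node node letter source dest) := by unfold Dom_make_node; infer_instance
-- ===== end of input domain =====

-- B flattens the grid into one buffer, writes the two edits at computed flat offsets
-- (source first so dest wins on overlap, out-of-range ignored), then reshapes by row
-- lengths — replacing A's per-cell coordinate scan; objective: alternative.

-- ===== PORT A =====
-- literal transliteration of A: outer fold carries (rows so far, x); inner fold carries (cells so far, y)
def make_node (node : List (List String)) (letter : String) (source : Int × Int) (dest : Int × Int) : List (List String) :=
  (node.foldl (fun (acc : List (List String) × Int) pods =>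
    let inner := pods.foldl (fun (st : List String × Int) pod =>
      let p := (acc.2, st.2)
      let pod' := if p = dest then letter else if p = source then "" else pod
      (st.1 ++ [pod'], st.2 + 1)) (([] : List String), (1 : Int))
    (acc.1 ++ [inner.1], acc.2 + 1)) (([] : List (List String)), (1 : Int))).1

-- ===== PORT B =====
-- Source B's `put`: bounds-checked write into the flat buffer at offset sum(lens[:x-1]) + y - 1
-- (the bounds check guarantees the index is in range, so List.set is exact for the Python assignment)
def pvPut (lens : List Nat) (coord : Int × Int) (value : String) (flat : List String) : List String :=
  if 1 ≤ coord.1 ∧ coord.1 ≤ (lens.length : Int) ∧ 1 ≤ coord.2 ∧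
      coord.2 ≤ (((lens[(coord.1 - 1).toNat]?).getD 0 : Nat) : Int) then
    flat.set ((lens.take (coord.1 - 1).toNat).sum + (coord.2 - 1).toNat) value
  else flat

-- Source B's reshape loop: cursor slices flat[i:i+n] become take/drop (indices are in range and nonnegative)
def pvChunk : List Nat → List String → List (List String)
  | [], _ => []
  | n :: ns, flat => flat.take n :: pvChunk ns (flat.drop n)

def make_node_alt (node : List (List String)) (letter : String) (source : Int × Int) (dest : Int × Int) : List (List String) :=
  let lens := node.map List.length
  let flat := node.flatten
  let flat1 := pvPut lens source "" flat
  let flat2 := pvPut lens dest letter flat1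
  pvChunk lens flat2

-- ===== PRECONDITION & SPEC =====
def Spec_make_node (node : List (List String)) (letter : String) (source : Int × Int) (dest : Int × Int) (out : List (List String)) : Prop := out = make_node_alt node letter source dest
instance (node : List (List String)) (letter : String) (source : Int × Int) (dest : Int × Int) (out : List (List String)) : Decidable (Spec_make_node node letter source dest out) := by unfold Spec_make_node; infer_instance

-- ===== CLAIM (what is proved, stated in full; the proofs are below) =====
def Claim_equal_make_node : Prop := ∀ (node : List (List String)) (letter : String) (source : Int × Int) (dest : Int × Int), Dom_make_node node letter source dest → Spec_make_node node letter source dest (make_node node letter source dest)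

-- ===== LEMMAS AND PROOFS =====

-- proof-side intermediate: the row-wise description both ports are reduced to

-- the value A gives cell (x, y) holding pod
def pvACell (letter : String) (source : Int × Int) (dest : Int × Int) (x y : Int) (pod : String) : String :=
  if (x, y) = dest then letter else if (x, y) = source then "" else pod

-- A's inner loop as a y-indexed map
def pvAMap (letter : String) (source : Int × Int) (dest : Int × Int) (x : Int) : Int → List String → List String
  | _, [] => []
  | y, pod :: rest => pvACell letter source dest x y pod :: pvAMap letter source dest x (y + 1) rest

-- B's effect on one row: clear source cell, then overwrite dest cell (dest wins)
def pvAltRow (letter : String) (source : Int × Int) (dest : Int × Int) (r : Int) (pods : List String) : List String :=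
  if r ≠ source.1 ∧ r ≠ dest.1 then pods
  else
    let row1 := if r = source.1 ∧ 1 ≤ source.2 ∧ source.2 ≤ (pods.length : Int)
                then pods.set (source.2 - 1).toNat "" else pods
    if r = dest.1 ∧ 1 ≤ dest.2 ∧ dest.2 ≤ (row1.length : Int)
    then row1.set (dest.2 - 1).toNat letter else row1

def pvAltRows (letter : String) (source : Int × Int) (dest : Int × Int) : Int → List (List String) → List (List String)
  | _, [] => []
  | r, pods :: rest => pvAltRow letter source dest r pods :: pvAltRows letter source dest (r + 1) rest

-- single bounds-checked grid update, recursing on rows (x counts down to 1)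
def pvGridSet (x y : Int) (v : String) : List (List String) → List (List String)
  | [] => []
  | r :: rs =>
    if x = 1 then (if 1 ≤ y ∧ y ≤ (r.length : Int) then r.set (y - 1).toNat v else r) :: rs
    else r :: pvGridSet (x - 1) y v rs

theorem pvAMap_length (letter : String) (source dest : Int × Int) (x : Int) :
    ∀ (pods : List String) (y : Int), (pvAMap letter source dest x y pods).length = pods.length := by
  intro pods
  induction pods with
  | nil => intro y; rfl
  | cons p rest ih => intro y; simp [pvAMap, ih]

theorem pvAMap_getElem (letter : String) (source dest : Int × Int) (x : Int) :
    ∀ (pods : List String) (y : Int) (j : Nat) (h : j < pods.length),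
      (pvAMap letter source dest x y pods)[j]'(by rw [pvAMap_length]; exact h)
        = pvACell letter source dest x (y + j) pods[j] := by
  intro pods
  induction pods with
  | nil => intro y j h; exact absurd h (by simp)
  | cons p rest ih =>
    intro y j h
    cases j with
    | zero => simp [pvAMap]
    | succ k =>
      have := ih (y + 1) k (by simpa using h)
      simpa [pvAMap, add_assoc, add_comm, add_left_comm] using this

-- A's inner fold computes pvAMap
theorem pvInner_fold (letter : String) (source dest : Int × Int) (x : Int) :
    ∀ (pods : List String) (acc : List String) (y : Int),
      pods.foldl (fun (st : List String × Int) pod =>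
        (st.1 ++ [if (x, st.2) = dest then letter else if (x, st.2) = source then "" else pod],
         st.2 + 1)) (acc, y)
      = (acc ++ pvAMap letter source dest x y pods, y + pods.length) := by
  intro pods
  induction pods with
  | nil => intro acc y; simp [pvAMap]
  | cons p rest ih =>
    intro acc y
    simp only [List.foldl_cons, ih, pvAMap, pvACell, Prod.mk.injEq]
    constructor
    · simp
    · simp only [List.length_cons]; push_cast; ring

-- per-row equality: A's y-indexed map of a row equals the row-wise positional rebuild
theorem pvRow_eq (letter : String) (source dest : Int × Int) (x : Int) (pods : List String) :
    pvAMap letter source dest x 1 pods = pvAltRow letter source dest x pods := by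
  have hlen : ∀ (c : Prop) [Decidable c] (i : Nat) (v : String),
      (if c then pods.set i v else pods).length = pods.length := by
    intro c _ i v; split_ifs <;> simp
  apply List.ext_getElem
  · rw [pvAMap_length]
    unfold pvAltRow
    split_ifs <;> simp <;> split_ifs <;> simp
  · intro j h1 h2
    have hj : j < pods.length := by rwa [pvAMap_length] at h1
    rw [pvAMap_getElem letter source dest x pods 1 j hj]
    unfold pvACell pvAltRow
    simp only [hlen, Prod.ext_iff]
    split_ifs <;>
      (try simp only [List.getElem_set]) <;>
      (try split_ifs) <;>
      first
        | rfl
        | (exfalso; omega)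

-- A's outer fold computes the row-by-row map
theorem pvOuter_fold (letter : String) (source dest : Int × Int) :
    ∀ (node : List (List String)) (acc : List (List String)) (x : Int),
      node.foldl (fun (acc : List (List String) × Int) pods =>
        (acc.1 ++ [(pods.foldl (fun (st : List String × Int) pod =>
            (st.1 ++ [if (acc.2, st.2) = dest then letter else if (acc.2, st.2) = source then "" else pod],
             st.2 + 1)) (([] : List String), (1 : Int))).1],
         acc.2 + 1)) (acc, x)
      = (acc ++ (pvAltRows letter source dest x node), x + node.length) := by
  intro node
  induction node with
  | nil => intro acc x; simp [pvAltRows]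
  | cons pods rest ih =>
    intro acc x
    simp only [List.foldl_cons, ih, pvAltRows, Prod.mk.injEq]
    constructor
    · rw [pvInner_fold]
      simp [pvRow_eq]
    · simp only [List.length_cons]; push_cast; ring

-- x ≤ 0 never reaches row 1, so the update is the identity
theorem pvGridSet_nonpos (y : Int) (v : String) :
    ∀ (node : List (List String)) (x : Int), x ≤ 0 → pvGridSet x y v node = node := by
  intro node
  induction node with
  | nil => intro x _; rfl
  | cons r rs ih =>
    intro x hx
    have hx1 : ¬ x = 1 := by omega
    simp [pvGridSet, hx1, ih (x - 1) (by omega)]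

-- pvGridSet preserves row lengths
theorem pvGridSet_lens (y : Int) (v : String) :
    ∀ (node : List (List String)) (x : Int),
      (pvGridSet x y v node).map List.length = node.map List.length := by
  intro node
  induction node with
  | nil => intro x; rfl
  | cons r rs ih =>
    intro x
    by_cases hx : x = 1 <;> (simp [pvGridSet, hx, ih]; try (split_ifs <;> simp))

-- reshaping the flattening by the row lengths restores the rows
theorem pvChunk_flatten :
    ∀ (node : List (List String)), pvChunk (node.map List.length) node.flatten = node := by
  intro node
  induction node with
  | nil => rfl
  | cons r rs ih => simp [pvChunk, ih]

-- the flat write equals the row-wise grid update, through flatten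
theorem pvPut_flatten (y : Int) (v : String) :
    ∀ (node : List (List String)) (x : Int),
      pvPut (node.map List.length) (x, y) v node.flatten = (pvGridSet x y v node).flatten := by
  intro node
  induction node with
  | nil =>
    intro x
    unfold pvPut pvGridSet
    split_ifs with h
    · exfalso
      obtain ⟨h1, h2, -⟩ := h
      simp at h2
      omega
    · rfl
  | cons r rs ih =>
    intro x
    by_cases hx1 : x = 1
    · subst hx1
      unfold pvPut pvGridSet
      simp only [show ((1:Int) - 1).toNat = 0 from rfl, List.take_zero, List.sum_nil,
        Nat.zero_add, List.map_cons, List.getElem?_cons_zero, Option.getD_some,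
        List.length_cons, List.length_map, List.flatten_cons]
      split_ifs with h1 h2 h3
      · have hlt : (y - 1).toNat < r.length := by
          obtain ⟨-, -, hy1, hy2⟩ := h1
          omega
        rw [List.set_append, if_pos hlt]
        simp
      · exfalso
        obtain ⟨-, -, hy1, hy2⟩ := h1
        exact h2 ⟨hy1, hy2⟩
      · exfalso
        obtain ⟨hy1, hy2⟩ := h3
        exact h1 ⟨le_refl 1, by push_cast; omega, hy1, hy2⟩
      · rfl
    · by_cases hx0 : x ≤ 0
      · rw [pvGridSet_nonpos y v (r :: rs) x hx0]
        unfold pvPut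
        split_ifs with h
        · exfalso; obtain ⟨h1, -⟩ := h; omega
        · rfl
      · -- x ≥ 2: the write lands in the tail
        obtain ⟨k, hk1, hk2⟩ : ∃ k, (x - 1).toNat = k + 1 ∧ (x - 1 - 1).toNat = k :=
          ⟨(x - 2).toNat, by omega, by omega⟩
        have htail := ih (x - 1)
        unfold pvGridSet
        rw [if_neg hx1]
        simp only [List.flatten_cons]
        rw [← htail]
        unfold pvPut
        simp only [hk1, hk2, List.map_cons, List.getElem?_cons_succ, List.length_cons,
          List.length_map, List.take_succ_cons, List.sum_cons]
        split_ifs with h1 h2 h3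
        · rw [add_assoc, List.set_append, if_neg (by omega), Nat.add_sub_cancel_left]
        · exfalso
          obtain ⟨ha, hb, hc, hd⟩ := h1
          push_cast at hb
          exact h2 ⟨by omega, by omega, hc, hd⟩
        · exfalso
          obtain ⟨ha, hb, hc, hd⟩ := h3
          exact h1 ⟨by omega, by push_cast; omega, hc, hd⟩
        · rfl

-- unfolding pvGridSet on a cons cell
theorem pvGridSet_cons_one (y : Int) (v : String) (r : List String) (rs : List (List String)) :
    pvGridSet 1 y v (r :: rs)
      = (if 1 ≤ y ∧ y ≤ (r.length : Int) then r.set (y - 1).toNat v else r) :: rs := by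
  unfold pvGridSet
  rw [if_pos rfl]

theorem pvGridSet_cons_ne (x y : Int) (v : String) (r : List String) (rs : List (List String))
    (h : ¬ x = 1) : pvGridSet x y v (r :: rs) = r :: pvGridSet (x - 1) y v rs := by
  unfold pvGridSet
  rw [if_neg h]
  cases rs <;> rfl

-- the row-wise map equals two staged grid updates (source first, dest second)
theorem pvAltRows_gridSet (letter : String) (source dest : Int × Int) :
    ∀ (node : List (List String)) (r : Int),
      pvAltRows letter source dest r node
        = pvGridSet (dest.1 - r + 1) dest.2 letter
            (pvGridSet (source.1 - r + 1) source.2 "" node) := by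
  intro node
  induction node with
  | nil => intro r; rfl
  | cons pods rest ih =>
    intro r
    have htail : pvAltRows letter source dest (r + 1) rest
        = pvGridSet (dest.1 - r) dest.2 letter (pvGridSet (source.1 - r) source.2 "" rest) := by
      have := ih (r + 1)
      simpa [show dest.1 - (r + 1) + 1 = dest.1 - r by ring,
             show source.1 - (r + 1) + 1 = source.1 - r by ring] using this
    have ha1 : source.1 - r + 1 - 1 = source.1 - r := by ring
    have hb1 : dest.1 - r + 1 - 1 = dest.1 - r := by ring
    by_cases hs : source.1 = r <;> by_cases hd : dest.1 = r
    · -- both edits land in this row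
      have ha : source.1 - r + 1 = 1 := by omega
      have hb : dest.1 - r + 1 = 1 := by omega
      have e1 : ∀ l, pvGridSet (source.1 - r) source.2 "" l = l :=
        fun l => pvGridSet_nonpos _ _ l _ (by omega)
      have e2 : ∀ l, pvGridSet (dest.1 - r) dest.2 letter l = l :=
        fun l => pvGridSet_nonpos _ _ l _ (by omega)
      simp only [pvAltRows, htail, e1, e2, ha, hb, pvAltRow, pvGridSet]
      simp [pvGridSet, hs, hd]
    · have ha : source.1 - r + 1 = 1 := by omega
      have hbne : ¬ dest.1 - r + 1 = 1 := by omega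
      have e1 : ∀ l, pvGridSet (source.1 - r) source.2 "" l = l :=
        fun l => pvGridSet_nonpos _ _ l _ (by omega)
      have hd' : ¬ r = dest.1 := fun h => hd h.symm
      simp only [pvAltRows, htail, e1, ha, pvAltRow, pvGridSet_cons_one, pvGridSet_cons_ne _ _ _ _ _ hbne, hb1]
      simp [hs, hd']
    · have hane : ¬ source.1 - r + 1 = 1 := by omega
      have hb : dest.1 - r + 1 = 1 := by omega
      have e2 : ∀ l, pvGridSet (dest.1 - r) dest.2 letter l = l :=
        fun l => pvGridSet_nonpos _ _ l _ (by omega)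
      have hs' : ¬ r = source.1 := fun h => hs h.symm
      simp only [pvAltRows, htail, e2, hb, pvAltRow, pvGridSet_cons_ne _ _ _ _ _ hane, pvGridSet_cons_one, ha1]
      simp [hs', hd]
    · have hane : ¬ source.1 - r + 1 = 1 := by omega
      have hbne : ¬ dest.1 - r + 1 = 1 := by omega
      have hs' : ¬ r = source.1 := fun h => hs h.symm
      have hd' : ¬ r = dest.1 := fun h => hd h.symm
      simp only [pvAltRows, htail, pvAltRow, pvGridSet_cons_ne _ _ _ _ _ hane, pvGridSet_cons_ne _ _ _ _ _ hbne, ha1, hb1]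
      simp [hs', hd']

-- ===== VERDICT (by name: the statement is the Claim_ definition above) =====
theorem make_node_spec : Claim_equal_make_node := by
  intro node letter source dest _
  obtain ⟨sx, sy⟩ := source
  obtain ⟨dx, dy⟩ := dest
  unfold Spec_make_node make_node make_node_alt
  rw [pvOuter_fold]
  simp only [List.nil_append]
  rw [pvPut_flatten sy "" node sx,
      ← pvGridSet_lens sy "" node sx,
      pvPut_flatten dy letter (pvGridSet sx sy "" node) dx,
      ← pvGridSet_lens dy letter (pvGridSet sx sy "" node) dx,
      pvChunk_flatten]
  have := pvAltRows_gridSet letter (sx, sy) (dx, dy) node 1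
  simpa using this
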